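-- pv_equiv track=rewrite | github.com/Maimoon-github/Agent-for-Custom-Data-Analysis | src/core/response_generator.py | _structure_for_comparison
-- ===== SOURCE A (Python) =====
-- def _structure_for_comparison(context: str) -> str:
--     """Structure context for easier comparison"""
--     # Simple implementation - group by sources
--     sources = context.split('[Source:')
--     if len(sources) > 1:
--         structured = sources[0]  # Header
--         for i, source in enumerate(sources[1:], 1):
--             structured += f"\n--- Source {i} ---\n[Source:{source}"
--         return structured
--     return context
-- ===== SOURCE B (Python) =====
-- def _structure_for_comparison(context: str) -> str:
--     """Structure context for easier comparison"""
--     # Single left-to-right scan with str.find: emit each chunk and its numbered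
--     # header as we go -- no split into a list of pieces, no enumerate pass.
--     sep = '[Source:'
--     out = ''
--     rest = context
--     n = 1
--     while True:
--         j = rest.find(sep)
--         if j == -1:
--             return out + rest
--         out += rest[:j] + f"\n--- Source {n} ---\n" + sep
--         rest = rest[j + len(sep):]
--         n += 1
-- ===== Notes on version B (the rewrite author's own statement) =====
-- stated objective: alternative
-- what changed: Replaced split-into-a-list-then-enumerate-and-reconcatenate with a single find-based scan that emits each chunk and its numbered header as it goes, never materialising the list of pieces.
import Mathlib
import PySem

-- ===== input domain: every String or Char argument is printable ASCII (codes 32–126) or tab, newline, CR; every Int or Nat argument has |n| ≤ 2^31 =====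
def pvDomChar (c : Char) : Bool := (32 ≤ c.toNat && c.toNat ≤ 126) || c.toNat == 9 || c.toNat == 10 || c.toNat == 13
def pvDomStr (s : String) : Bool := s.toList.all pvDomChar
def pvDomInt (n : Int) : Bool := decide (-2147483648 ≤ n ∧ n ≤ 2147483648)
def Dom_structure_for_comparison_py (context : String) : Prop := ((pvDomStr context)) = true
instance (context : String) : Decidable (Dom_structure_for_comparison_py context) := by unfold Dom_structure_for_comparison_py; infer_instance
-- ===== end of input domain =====

-- B replaces A's split-into-pieces + enumerate rebuild by a single find-based scan
-- that emits each chunk and its numbered header as it goes (objective: alternative).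


-- ===== PORT A =====
-- sources = context.split('[Source:'); if len(sources) > 1: rebuild with enumerate loop
def structure_for_comparison_py (context : String) : String :=
  let sources := PySem.Chars.splitOn context.toList "[Source:".toList
  if sources.length > 1 then
    -- structured = sources[0]; for i, source in enumerate(sources[1:], 1): structured += f"..."
    -- sources[0] is read with headD: str.split always returns at least one piece
    String.ofList
      ((PySem.List.enumerate (PySem.List.slice sources (some 1) none) 1).foldl
        (fun acc p =>
          acc ++ "\n--- Source ".toList ++ PySem.Int.toChars p.1 ++ " ---\n[Source:".toList ++ p.2)
        (sources.headD []))
  else context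

-- ===== PORT B =====
def pvSep : List Char := "[Source:".toList

-- the while-loop of Source B: state (out, rest, n); fuel > rest.length makes the 0 case unreachable
def sfcGo (fuel : Nat) (out rest : List Char) (n : Int) : List Char :=
  match fuel with
  | 0 => out ++ rest
  | fuel + 1 =>
    let j := PySem.Chars.find rest pvSep
    if j = -1 then out ++ rest
    else
      sfcGo fuel
        (out ++ PySem.List.slice rest none (some j) ++ "\n--- Source ".toList
             ++ PySem.Int.toChars n ++ " ---\n".toList ++ pvSep)
        (PySem.List.slice rest (some (j + pvSep.length)) none) (n + 1)

def structure_for_comparison_py_alt (context : String) : String :=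
  String.ofList (sfcGo (context.toList.length + 1) [] context.toList 1)

-- ===== PRECONDITION & SPEC =====
def Spec_structure_for_comparison_py (context : String) (out : String) : Prop := out = structure_for_comparison_py_alt context
instance (context : String) (out : String) : Decidable (Spec_structure_for_comparison_py context out) := by unfold Spec_structure_for_comparison_py; infer_instance

-- ===== CLAIM (what is proved, stated in full; the proofs are below) =====
def Claim_equal_structure_for_comparison_py : Prop := ∀ (context : String), Dom_structure_for_comparison_py context → Spec_structure_for_comparison_py context (structure_for_comparison_py context)

-- ===== LEMMAS AND PROOFS =====

-- the text A's loop appends for pieces ps, numbering from n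
def pvRebuild : List (List Char) → Int → List Char
  | [], _ => []
  | p :: ps, n =>
      "\n--- Source ".toList ++ PySem.Int.toChars n ++ " ---\n[Source:".toList
        ++ p ++ pvRebuild ps (n + 1)

-- head piece plus the rebuilt tail
def pvJoin : List (List Char) → Int → List Char
  | [], _ => []
  | p :: ps, n => p ++ pvRebuild ps n

theorem pv_foldl_enumerate (ps : List (List Char)) (n : Int) (acc : List Char) :
    (PySem.List.enumerate ps n).foldl
      (fun acc p =>
        acc ++ "\n--- Source ".toList ++ PySem.Int.toChars p.1 ++ " ---\n[Source:".toList ++ p.2)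
      acc = acc ++ pvRebuild ps n := by
  induction ps generalizing n acc with
  | nil => simp [PySem.List.enumerate, pvRebuild]
  | cons p ps ih =>
      rw [PySem.List.enumerate_cons]
      simp only [List.foldl_cons, ih, pvRebuild]
      simp [List.append_assoc]

theorem pv_find_eq_of (s k : _) (h1 : pvSep <+: List.drop k s)
    (h2 : ∀ i < k, ¬ pvSep <+: List.drop i s) : PySem.Chars.find s pvSep = (k : Int) := by
  have hin : 0 ≤ PySem.Chars.find s pvSep := by
    rw [PySem.Chars.find_nonneg_iff, ← PySem.Chars.isIn_iff_infix,
      ← PySem.Chars.exists_prefix_drop_iff_isIn]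
    exact ⟨k, h1⟩
  obtain ⟨hpre, hmin⟩ := PySem.Chars.find_spec hin
  have h3 : ¬ (PySem.Chars.find s pvSep).toNat < k := fun h => h2 _ h hpre
  have h4 : ¬ k < (PySem.Chars.find s pvSep).toNat := fun h => hmin _ h h1
  omega

theorem pv_find_prefix {l : List Char} (h : pvSep.isPrefixOf l = true) :
    PySem.Chars.find l pvSep = 0 := by
  have h1 : pvSep <+: List.drop 0 l := (PySem.Chars.startswith_iff l pvSep).mp h
  have := pv_find_eq_of l 0 h1 (by omega)
  exact_mod_cast this

theorem pv_find_step {c : Char} {rest : List Char}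
    (hnp : pvSep.isPrefixOf (c :: rest) = false) :
    PySem.Chars.find (c :: rest) pvSep =
      if PySem.Chars.find rest pvSep = -1 then -1 else PySem.Chars.find rest pvSep + 1 := by
  have hnp' : ¬ pvSep <+: (c :: rest) := fun h => by
    have ht : pvSep.isPrefixOf (c :: rest) = true :=
      (PySem.Chars.startswith_iff (c :: rest) pvSep).mpr h
    rw [ht] at hnp
    simp at hnp
  split
  · rename_i hm1
    rw [PySem.Chars.find_eq_neg_one_iff] at hm1 ⊢
    intro hin
    rw [← PySem.Chars.isIn_iff_infix, ← PySem.Chars.exists_prefix_drop_iff_isIn] at hin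
    obtain ⟨j, hj⟩ := hin
    cases j with
    | zero => exact hnp' (by simpa using hj)
    | succ j =>
        exact hm1 (by
          rw [← PySem.Chars.isIn_iff_infix, ← PySem.Chars.exists_prefix_drop_iff_isIn]
          exact ⟨j, by simpa using hj⟩)
  · rename_i hm1
    have hpos : 0 ≤ PySem.Chars.find rest pvSep := by
      have := PySem.Chars.neg_one_le_find rest pvSep; omega
    obtain ⟨hpre, hmin⟩ := PySem.Chars.find_spec hpos
    have := pv_find_eq_of (c :: rest) ((PySem.Chars.find rest pvSep).toNat + 1)
      (by simpa using hpre)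
      (by
        intro i hi
        cases i with
        | zero => simpa using hnp'
        | succ i => exact fun h => hmin i (by omega) (by simpa using h))
    rw [this]; omega

-- closed form of splitOn.go (hence of context.split('[Source:'))
theorem pv_go_closed : ∀ (N : Nat) (l : List Char), l.length ≤ N → ∀ fuel, l.length < fuel →
    ∀ (cur : List Char) (acc : List (List Char)),
    PySem.Chars.splitOn.go pvSep fuel l cur acc =
      acc.reverse ++
        (if PySem.Chars.find l pvSep = -1 then [cur.reverse ++ l]
         else (cur.reverse ++ l.take (PySem.Chars.find l pvSep).toNat) ::
           PySem.Chars.splitOn (l.drop ((PySem.Chars.find l pvSep).toNat + pvSep.length)) pvSep) := by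
  intro N
  induction N with
  | zero =>
      intro l hl fuel hf cur acc
      have : l = [] := by cases l <;> simp_all
      subst this
      obtain ⟨f, rfl⟩ : ∃ f, fuel = f + 1 := ⟨fuel - 1, by omega⟩
      have hfind : PySem.Chars.find ([] : List Char) pvSep = -1 := by
        rw [PySem.Chars.find_eq_neg_one_iff]
        intro h; have := List.eq_nil_of_infix_nil h; simp [pvSep] at this
      simp [PySem.Chars.splitOn.go, hfind]
  | succ N ih =>
      intro l hl fuel hf cur acc
      obtain ⟨f, rfl⟩ : ∃ f, fuel = f + 1 := ⟨fuel - 1, by omega⟩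
      cases l with
      | nil =>
          have hfind : PySem.Chars.find ([] : List Char) pvSep = -1 := by
            rw [PySem.Chars.find_eq_neg_one_iff]
            intro h; have := List.eq_nil_of_infix_nil h; simp [pvSep] at this
          simp [PySem.Chars.splitOn.go, hfind]
      | cons c rest =>
          by_cases hp : pvSep.isPrefixOf (c :: rest) = true
          · -- separator right here: find = 0, go recurses on the dropped tail
            have hstep : PySem.Chars.splitOn.go pvSep (f + 1) (c :: rest) cur acc
                = PySem.Chars.splitOn.go pvSep f (List.drop pvSep.length (c :: rest)) []
                    (cur.reverse :: acc) := by
              simp [PySem.Chars.splitOn.go, hp]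
            have hlen : pvSep <+: (c :: rest) := (PySem.Chars.startswith_iff _ _).mp hp
            have hlen8 : pvSep.length ≤ (c :: rest).length := hlen.length_le
            have hsep8 : pvSep.length = 8 := by decide
            have hd : (List.drop pvSep.length (c :: rest)).length ≤ N := by
              simp only [List.length_drop]; simp at hl ⊢; omega
            have hfind0 : PySem.Chars.find (c :: rest) pvSep = 0 := pv_find_prefix hp
            rw [hstep, ih _ hd f (by simp at hf ⊢; omega) [] (cur.reverse :: acc)]
            have hsplit : PySem.Chars.splitOn (List.drop pvSep.length (c :: rest)) pvSep
                = (if PySem.Chars.find (List.drop pvSep.length (c :: rest)) pvSep = -1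
                    then [List.drop pvSep.length (c :: rest)]
                    else (List.drop pvSep.length (c :: rest)).take
                        (PySem.Chars.find (List.drop pvSep.length (c :: rest)) pvSep).toNat ::
                      PySem.Chars.splitOn ((List.drop pvSep.length (c :: rest)).drop
                        ((PySem.Chars.find (List.drop pvSep.length (c :: rest)) pvSep).toNat +
                          pvSep.length)) pvSep) := by
              have := ih _ hd ((List.drop pvSep.length (c :: rest)).length + 1) (by omega) [] []
              simpa [PySem.Chars.splitOn] using this
            rw [hfind0]
            simp only [List.reverse_nil, List.nil_append]
            rw [← hsplit]
            simp
          · have hp' : pvSep.isPrefixOf (c :: rest) = false := by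
              revert hp; cases pvSep.isPrefixOf (c :: rest) <;> simp
            have hstep : PySem.Chars.splitOn.go pvSep (f + 1) (c :: rest) cur acc
                = PySem.Chars.splitOn.go pvSep f rest (c :: cur) acc := by
              simp [PySem.Chars.splitOn.go, hp']
            rw [hstep, ih rest (by simp at hl; omega) f (by simp at hf; omega) (c :: cur) acc]
            rw [pv_find_step hp']
            by_cases hm : PySem.Chars.find rest pvSep = -1
            · simp [hm]
            · have hpos : 0 ≤ PySem.Chars.find rest pvSep := by
                have := PySem.Chars.neg_one_le_find rest pvSep; omega
              have hne : ¬ PySem.Chars.find rest pvSep + 1 = -1 := by omega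
              have htn : (PySem.Chars.find rest pvSep + 1).toNat
                  = (PySem.Chars.find rest pvSep).toNat + 1 := by omega
              simp only [hm, if_false, hne, if_false, htn]
              rw [show (PySem.Chars.find rest pvSep).toNat + 1 + pvSep.length
                  = ((PySem.Chars.find rest pvSep).toNat + pvSep.length) + 1 from by omega,
                List.drop_succ_cons]
              simp [List.take_succ_cons]

theorem pv_splitOn_closed (l : List Char) :
    PySem.Chars.splitOn l pvSep =
      (if PySem.Chars.find l pvSep = -1 then [l]
       else l.take (PySem.Chars.find l pvSep).toNat ::
         PySem.Chars.splitOn (l.drop ((PySem.Chars.find l pvSep).toNat + pvSep.length)) pvSep) := by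
  have := pv_go_closed l.length l le_rfl (l.length + 1) (by omega) [] []
  simpa [PySem.Chars.splitOn] using this

theorem pv_splitOn_ne_nil (l : List Char) : PySem.Chars.splitOn l pvSep ≠ [] := by
  rw [pv_splitOn_closed]; split <;> simp

-- the scan of Source B computes exactly "head piece ++ rebuilt tail"
theorem pv_sfcGo_eq : ∀ (N : Nat) (rest : List Char), rest.length ≤ N →
    ∀ fuel, rest.length < fuel → ∀ (out : List Char) (n : Int),
    sfcGo fuel out rest n = out ++ pvJoin (PySem.Chars.splitOn rest pvSep) n := by
  intro N
  induction N with
  | zero =>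
      intro rest hl fuel hf out n
      have : rest = [] := by cases rest <;> simp_all
      subst this
      obtain ⟨f, rfl⟩ : ∃ f, fuel = f + 1 := ⟨fuel - 1, by omega⟩
      have hfind : PySem.Chars.find ([] : List Char) pvSep = -1 := by
        rw [PySem.Chars.find_eq_neg_one_iff]
        intro h; have := List.eq_nil_of_infix_nil h; simp [pvSep] at this
      rw [pv_splitOn_closed]
      simp [sfcGo, hfind, pvJoin, pvRebuild]
  | succ N ih =>
      intro rest hl fuel hf out n
      obtain ⟨f, rfl⟩ : ∃ f, fuel = f + 1 := ⟨fuel - 1, by omega⟩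
      by_cases hm : PySem.Chars.find rest pvSep = -1
      · rw [pv_splitOn_closed]
        simp [sfcGo, hm, pvJoin, pvRebuild]
      · have hpos : 0 ≤ PySem.Chars.find rest pvSep := by
          have := PySem.Chars.neg_one_le_find rest pvSep; omega
        obtain ⟨hpre, -⟩ := PySem.Chars.find_spec hpos
        have hsep8 : pvSep.length = 8 := by decide
        have hlen : pvSep.length ≤ rest.length - (PySem.Chars.find rest pvSep).toNat := by
          have := hpre.length_le; simpa using this
        have htnlt : (PySem.Chars.find rest pvSep).toNat + pvSep.length ≤ rest.length := by
          omega
        have hstep : sfcGo (f + 1) out rest n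
            = sfcGo f
                (out ++ rest.take (PySem.Chars.find rest pvSep).toNat ++ "\n--- Source ".toList
                   ++ PySem.Int.toChars n ++ " ---\n".toList ++ pvSep)
                (rest.drop ((PySem.Chars.find rest pvSep).toNat + pvSep.length)) (n + 1) := by
          simp only [sfcGo, hm, if_false]
          rw [PySem.List.slice_to rest hpos,
            PySem.List.slice_from rest (a := PySem.Chars.find rest pvSep + (pvSep.length : Int))
              (by omega)]
          congr 2
          omega
        have hd : (rest.drop ((PySem.Chars.find rest pvSep).toNat + pvSep.length)).length ≤ N := by
          simp only [List.length_drop]; omega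
        rw [hstep, ih _ hd f (by simp only [List.length_drop]; omega) _ (n + 1)]
        rw [pv_splitOn_closed rest]
        simp only [hm, if_false]
        obtain ⟨q, qs, hq⟩ :
            ∃ q qs, PySem.Chars.splitOn
              (rest.drop ((PySem.Chars.find rest pvSep).toNat + pvSep.length)) pvSep = q :: qs := by
          rcases h : PySem.Chars.splitOn
              (rest.drop ((PySem.Chars.find rest pvSep).toNat + pvSep.length)) pvSep with _ | ⟨q, qs⟩
          · exact absurd h (pv_splitOn_ne_nil _)
          · exact ⟨q, qs, rfl⟩
        rw [hq]
        have hcat : (" ---\n[Source:".toList : List Char) = " ---\n".toList ++ pvSep := by decide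
        simp [pvJoin, pvRebuild, hcat, List.append_assoc]

theorem pv_splitOn_length_gt_one (l : List Char) :
    1 < (PySem.Chars.splitOn l pvSep).length ↔ PySem.Chars.find l pvSep ≠ -1 := by
  rw [pv_splitOn_closed]
  split
  · rename_i h; simp [h]
  · rename_i h
    have h1 : PySem.Chars.splitOn
        (l.drop ((PySem.Chars.find l pvSep).toNat + pvSep.length)) pvSep ≠ [] :=
      pv_splitOn_ne_nil _
    constructor
    · intro _; exact h
    · intro _
      rcases hsp : PySem.Chars.splitOn
          (l.drop ((PySem.Chars.find l pvSep).toNat + pvSep.length)) pvSep with _ | ⟨q, qs⟩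
      · exact absurd hsp h1
      · simp

-- ===== VERDICT (by name: the statement is the Claim_ definition above) =====
theorem structure_for_comparison_py_spec : Claim_equal_structure_for_comparison_py := by
  intro context _
  unfold Spec_structure_for_comparison_py structure_for_comparison_py structure_for_comparison_py_alt
  rw [pv_sfcGo_eq context.toList.length context.toList le_rfl (context.toList.length + 1)
    (by omega) [] 1]
  rw [show ("[Source:".toList : List Char) = pvSep from rfl]
  simp only [List.nil_append]
  by_cases hm : PySem.Chars.find context.toList pvSep = -1
  · have hlen : ¬ 1 < (PySem.Chars.splitOn context.toList pvSep).length := by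
      rw [pv_splitOn_length_gt_one]; simp [hm]
    rw [if_neg hlen, pv_splitOn_closed]
    simp [hm, pvJoin, pvRebuild, String.ofList_toList]
  · have hlen : 1 < (PySem.Chars.splitOn context.toList pvSep).length :=
      (pv_splitOn_length_gt_one context.toList).mpr hm
    rw [if_pos hlen]
    obtain ⟨p, ps, hp⟩ :
        ∃ p ps, PySem.Chars.splitOn context.toList pvSep = p :: ps := by
      rcases h : PySem.Chars.splitOn context.toList pvSep with _ | ⟨p, ps⟩
      · exact absurd h (pv_splitOn_ne_nil context.toList)
      · exact ⟨p, ps, rfl⟩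
    rw [hp, PySem.List.slice_from _ (by omega : (0:Int) ≤ 1)]
    simp only [Int.toNat_one, List.drop_succ_cons, List.drop_zero, List.headD_cons]
    rw [pv_foldl_enumerate]
    simp [pvJoin]
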